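-- pv_equiv track=rewrite | github.com/yoonmyunghoon/JDI | 알고리즘/프로그래머스/2022 Kakao 블라인드 채용 예선/2.py | solution
-- ===== SOURCE A (Python) =====
-- import math
--
-- def solution(n, k):
--     # 진법 변환
--     def convert(x, y):
--         result_num = ''
--         temp = '0123456789ABCDEF'
--         while x > 0:
--             result_num += temp[int(x % y)]
--             x = int(x // y)
--         return result_num[::-1]
--
--     # 소수 찾기
--     def is_prime_number(num):
--         if num == 0 or num == 1:
--             return False
--         else:
--             for i in range(2, int(math.sqrt(num)) + 1):
--                 if num % i == 0:
--                     return False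
--             return True
--
--     changed_num = convert(n, k)
--     candidate_list_before = list(changed_num.split('0'))
--     candidate_list = []
--     for candidate in candidate_list_before:
--         if candidate != '':
--             candidate_list.append(int(candidate))
--     if len(candidate_list) == 0:
--         return 0
--     else:
--         cnt = 0
--         for candi in candidate_list:
--             if is_prime_number(candi):
--                 cnt += 1
--         return cnt
-- ===== SOURCE B (Python) =====
-- import math
--
-- def solution(n, k):
--     # digit loop over n in base k (LSB first); segments between zero digits are
--     # accumulated directly as decimal values, no string conversion or split.
--     def is_prime(num):
--         return num >= 2 and all(num % d for d in range(2, int(math.sqrt(num)) + 1))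
--
--     cands = []
--     cur = 0
--     mult = 1
--     while n > 0:
--         d = n % k
--         n //= k
--         if d:
--             cur += d * mult
--             mult *= 10
--         else:
--             if cur:
--                 cands.append(cur)
--             cur = 0
--             mult = 1
--     if cur:
--         cands.append(cur)
--     return sum(1 for c in cands if is_prime(c))
-- ===== Notes on version B (the rewrite author's own statement) =====
-- stated objective: alternative
-- what changed: B drops A's base-k string conversion, split('0') and int() re-parsing: one numeric loop takes digits n % k LSB-first and accumulates each zero-separated segment directly as its decimal value with a power-of-10 multiplier, then counts primes among the segment values with the same sqrt-bounded trial division.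
-- outside the precondition, e.g. on solution(5, 100): A returns 1, B returns 1; on solution(3, -12): A returns 1, B returns 0; on solution(11, 16): A raises ValueError, B returns 1
import Mathlib
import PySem

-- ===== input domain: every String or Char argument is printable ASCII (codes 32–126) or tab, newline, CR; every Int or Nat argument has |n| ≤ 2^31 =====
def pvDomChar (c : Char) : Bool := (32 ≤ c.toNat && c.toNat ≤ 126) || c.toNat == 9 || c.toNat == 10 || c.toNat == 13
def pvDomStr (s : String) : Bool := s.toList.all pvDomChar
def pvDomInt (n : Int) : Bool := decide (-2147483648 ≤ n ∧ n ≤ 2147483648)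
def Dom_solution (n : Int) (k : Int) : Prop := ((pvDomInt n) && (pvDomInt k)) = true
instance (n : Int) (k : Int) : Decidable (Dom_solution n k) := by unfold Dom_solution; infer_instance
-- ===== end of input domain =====

-- B replaces A's base-k string conversion + split('0') + int() re-parsing by one numeric
-- digit loop that accumulates each zero-separated segment directly as its decimal value
-- (objective: alternative decomposition, no string round-trip).

-- ===== PORT A =====
-- A's strings are ported on the List Char side (PySem.Chars), as PYSEM.md directs.
def pvTemp : List Char := ['0','1','2','3','4','5','6','7','8','9','A','B','C','D','E','F']

-- while x > 0: result_num += temp[int(x % y)]; x = int(x // y)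
-- (fuel only makes the while-loop total; with y ≥ 2 — guaranteed by Pre_ whenever the loop
-- runs — x strictly decreases, so fuel x.toNat + 1 never runs out; temp[...] out of range is
-- an IndexError in Python, outside Pre_, ported with a default)
def pvConvertLoop : Nat → Int → Int → List Char → List Char
  | 0, _, _, acc => acc
  | f+1, x, y, acc =>
    if x > 0 then
      pvConvertLoop f (PySem.Int.floordiv x y) y
        (acc ++ [(PySem.List.pyGet? pvTemp (PySem.Int.mod x y)).getD ' '])
    else acc

-- convert(x, y): build the digit characters, then result_num[::-1]
def pvConvert (x y : Int) : List Char := (pvConvertLoop (x.toNat + 1) x y []).reverse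

-- is_prime_number(num); int(math.sqrt(num)) is ported as Nat.sqrt num.toNat (for negative num
-- Python raises ValueError — such num never reaches this helper under Pre_)
def pvIsPrimeA (num : Int) : Bool :=
  if num == 0 || num == 1 then false
  else (PySem.List.pyRange 2 (((Nat.sqrt num.toNat : Nat) : Int) + 1) 1).all
         (fun i => !(PySem.Int.mod num i == 0))

-- int(candidate): under Pre_ every candidate is a nonempty string of '0'..'9' digit chars,
-- on which Python's int is exactly this left-to-right fold (ported by hand; exact there)
def pvParseDigits (cs : List Char) : Int :=
  cs.foldl (fun a c => 10 * a + ((c.toNat : Int) - 48)) 0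

def solution (n : Int) (k : Int) : Int :=
  let changed := pvConvert n k
  let before := (PySem.Chars.split? changed ['0']).getD []      -- changed_num.split('0')
  let cand := before.foldl
    (fun acc c => if c ≠ [] then acc ++ [pvParseDigits c] else acc) ([] : List Int)
  if cand.length = 0 then 0
  else cand.foldl (fun cnt c => if pvIsPrimeA c then cnt + 1 else cnt) 0

-- ===== PORT B =====
-- is_prime(num) of Source B: num >= 2 and all(num % d for d in range(2, int(math.sqrt(num)) + 1))
def pvIsPrimeB (num : Int) : Bool :=
  decide (2 ≤ num) &&
    (PySem.List.pyRange 2 (((Nat.sqrt num.toNat : Nat) : Int) + 1) 1).all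
      (fun d => !(PySem.Int.mod num d == 0))

-- the while-loop of Source B over (cands, cur, mult); fuel as in pvConvertLoop, totality only
def pvAltLoop : Nat → Int → Int → Int → Int → List Int → List Int × Int
  | 0, _, _, cur, _, cands => (cands, cur)
  | f+1, x, y, cur, mult, cands =>
    if x > 0 then
      if PySem.Int.mod x y ≠ 0 then
        pvAltLoop f (PySem.Int.floordiv x y) y (cur + PySem.Int.mod x y * mult) (mult * 10) cands
      else
        pvAltLoop f (PySem.Int.floordiv x y) y 0 1 (if cur ≠ 0 then cands ++ [cur] else cands)
    else (cands, cur)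

def solution_alt (n : Int) (k : Int) : Int :=
  let r := pvAltLoop (n.toNat + 1) n k 0 1 []
  let cands := if r.2 ≠ 0 then r.1 ++ [r.2] else r.1
  cands.foldl (fun cnt c => if pvIsPrimeB c then cnt + 1 else cnt) 0

-- ===== PRECONDITION & SPEC =====
-- Pre_ excludes, for n > 0 only, bases outside 2..10: k = 0 raises ZeroDivisionError; k = 1
-- loops forever; for k < 0 the digits x % k are negative, so temp[...] wraps around and any
-- value A returns is an accident of negative string indexing; k ≥ 11 raises ValueError on a
-- letter digit, except for the few n whose base-k digits are all ≤ 9, where A returns and B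
-- agrees (excluded only to keep Pre_ a simple bound).  For n ≤ 0 the loop never runs and A
-- returns 0 for every k, so those inputs stay inside Pre_.
def Pre_solution (n : Int) (k : Int) : Prop := n ≤ 0 ∨ (2 ≤ k ∧ k ≤ 10)
instance (n : Int) (k : Int) : Decidable (Pre_solution n k) := by unfold Pre_solution; infer_instance

def pvWitness_solution : Int × Int := (437, 3)

def Spec_solution (n : Int) (k : Int) (out : Int) : Prop := out = solution_alt n k
instance (n : Int) (k : Int) (out : Int) : Decidable (Spec_solution n k out) := by unfold Spec_solution; infer_instance

-- ===== CLAIM (what is proved, stated in full; the proofs are below) =====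
def Claim_equal_solution : Prop := ∀ (n : Int) (k : Int), Dom_solution n k → Pre_solution n k → Spec_solution n k (solution n k)

-- ===== LEMMAS AND PROOFS =====

-- the base-k digits of x, least significant first, as both loops produce them
def pvDigits : Nat → Int → Int → List Int
  | 0, _, _ => []
  | f+1, x, y => if x > 0 then PySem.Int.mod x y :: pvDigits f (PySem.Int.floordiv x y) y else []

def pvChr (d : Int) : Char := (PySem.List.pyGet? pvTemp d).getD ' '

-- split a list on a separator element (Python str.split: empty pieces kept)
def pvSplit0 {α : Type} [DecidableEq α] (z : α) : List α → List (List α)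
  | [] => [[]]
  | a :: t =>
    if a = z then [] :: pvSplit0 z t
    else match pvSplit0 z t with
      | [] => [[a]]
      | p :: ps => (a :: p) :: ps

def pvConsHd {α : Type} (pre : List α) : List (List α) → List (List α)
  | [] => [pre]
  | p :: ps => (pre ++ p) :: ps

def pvAppLast {α : Type} (a : α) : List (List α) → List (List α)
  | [] => [[a]]
  | [p] => [p ++ [a]]
  | p :: ps => p :: pvAppLast a ps

-- decimal value of a digit list, least significant digit first
def pvVal (p : List Int) : Int := p.foldr (fun d a => 10 * a + d) 0

def pvFin : List Int × Int → List Int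
  | (cs, c) => if c ≠ 0 then cs ++ [c] else cs

-- the list-level form of Source B's loop
def pvBLoop : List Int → Int → Int → List Int → List Int × Int
  | [], cur, _, cands => (cands, cur)
  | d :: t, cur, mult, cands =>
    if d ≠ 0 then pvBLoop t (cur + d * mult) (mult * 10) cands
    else pvBLoop t 0 1 (if cur ≠ 0 then cands ++ [cur] else cands)

-- the candidate values contributed by a piece list, with a partial segment (cur, mult) open
def pvSegs (cur mult : Int) : List (List Int) → List Int
  | [] => []
  | p :: ps =>
    (if cur + mult * pvVal p ≠ 0 then [cur + mult * pvVal p] else [])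
      ++ (ps.filter (· ≠ [])).map pvVal

theorem pvFin_def (r : List Int × Int) : pvFin r = if r.2 ≠ 0 then r.1 ++ [r.2] else r.1 := by
  cases r; rfl

theorem pvConvertLoop_eq_digits (f : Nat) : ∀ (x y : Int) (acc : List Char),
    pvConvertLoop f x y acc = acc ++ (pvDigits f x y).map pvChr := by
  induction f with
  | zero => intro x y acc; simp [pvConvertLoop, pvDigits]
  | succ f ih =>
    intro x y acc
    simp only [pvConvertLoop, pvDigits]
    split_ifs with h
    · rw [ih]; simp [pvChr]
    · simp

theorem pvAltLoop_eq_bLoop (f : Nat) : ∀ (x y cur mult : Int) (cands : List Int),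
    pvAltLoop f x y cur mult cands = pvBLoop (pvDigits f x y) cur mult cands := by
  induction f with
  | zero => intro x y cur mult cands; simp [pvAltLoop, pvDigits, pvBLoop]
  | succ f ih =>
    intro x y cur mult cands
    simp only [pvAltLoop, pvDigits]
    by_cases h : x > 0
    · rw [if_pos h, if_pos h]
      simp only [pvBLoop]
      by_cases hd : PySem.Int.mod x y ≠ 0
      · rw [if_pos hd, if_pos hd, ih]
      · rw [if_neg hd, if_neg hd, ih]
    · rw [if_neg h, if_neg h]; simp [pvBLoop]

theorem pvDigits_bounds (f : Nat) : ∀ (x y : Int), 2 ≤ y → y ≤ 10 →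
    ∀ d ∈ pvDigits f x y, 0 ≤ d ∧ d ≤ 9 := by
  induction f with
  | zero => intro x y _ _ d hd; simp [pvDigits] at hd
  | succ f ih =>
    intro x y h2 h10 d hd
    simp only [pvDigits] at hd
    split_ifs at hd with h
    · rcases List.mem_cons.mp hd with rfl | hm
      · have := PySem.Int.mod_nonneg x (b := y) (by omega)
        have := PySem.Int.mod_lt x (b := y) (by omega)
        omega
      · exact ih _ _ h2 h10 d hm
    · simp at hd

theorem pvDigits_nil_of_nonpos (f : Nat) (x y : Int) (h : x ≤ 0) :
    pvDigits f x y = [] := by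
  cases f with
  | zero => rfl
  | succ f => simp [pvDigits]; omega

theorem pvSplit0_ne_nil {α : Type} [DecidableEq α] (z : α) (l : List α) :
    pvSplit0 z l ≠ [] := by
  induction l with
  | nil => simp [pvSplit0]
  | cons a t ih =>
    simp only [pvSplit0]
    split_ifs with h
    · simp
    · cases hs : pvSplit0 z t with
      | nil => exact absurd hs ih
      | cons p ps => simp

theorem pvConsHd_nil {α : Type} (ls : List (List α)) (h : ls ≠ []) :
    pvConsHd [] ls = ls := by
  cases ls with
  | nil => exact absurd rfl h
  | cons p ps => simp [pvConsHd]

theorem pvSplitOn_go (z : Char) (l : List Char) : ∀ (fuel : Nat), l.length ≤ fuel →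
    ∀ (cur : List Char) (acc : List (List Char)),
    PySem.Chars.splitOn.go [z] fuel l cur acc
      = acc.reverse ++ pvConsHd cur.reverse (pvSplit0 z l) := by
  induction l with
  | nil =>
    intro fuel _ cur acc
    cases fuel <;> simp [PySem.Chars.splitOn.go, pvSplit0, pvConsHd]
  | cons c rest ih =>
    intro fuel hf cur acc
    cases fuel with
    | zero => simp at hf
    | succ f =>
      have hf' : rest.length ≤ f := by simpa using hf
      by_cases hc : c = z
      · rw [show PySem.Chars.splitOn.go [z] (f+1) (c :: rest) cur acc
              = PySem.Chars.splitOn.go [z] f (List.drop 1 (c :: rest)) [] (cur.reverse :: acc) from by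
          simp [PySem.Chars.splitOn.go, List.isPrefixOf, hc]]
        rw [List.drop_one, List.tail_cons, ih f hf' [] (cur.reverse :: acc),
            List.reverse_nil, pvConsHd_nil _ (pvSplit0_ne_nil z rest)]
        simp [pvSplit0, hc, pvConsHd]
      · have hpre : List.isPrefixOf [z] (c :: rest) = false := by
          simp [List.isPrefixOf]; exact fun h => absurd h.symm hc
        rw [show PySem.Chars.splitOn.go [z] (f+1) (c :: rest) cur acc
              = PySem.Chars.splitOn.go [z] f rest (c :: cur) acc from by
          simp [PySem.Chars.splitOn.go, hpre]]
        rw [ih f hf' (c :: cur) acc]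
        simp only [pvSplit0, if_neg hc]
        cases hs : pvSplit0 z rest with
        | nil => exact absurd hs (pvSplit0_ne_nil z rest)
        | cons p ps => simp [pvConsHd]

theorem pvSplitOn_eq (z : Char) (l : List Char) :
    PySem.Chars.splitOn l [z] = pvSplit0 z l := by
  unfold PySem.Chars.splitOn
  rw [pvSplitOn_go z l (l.length + 1) (by omega) [] []]
  simp [pvConsHd_nil _ (pvSplit0_ne_nil z l)]

theorem pvSplit0_map {α β : Type} [DecidableEq α] [DecidableEq β]
    (z : α) (w : β) (g : α → β) (l : List α)
    (hg : ∀ a ∈ l, (g a = w ↔ a = z)) :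
    pvSplit0 w (l.map g) = (pvSplit0 z l).map (List.map g) := by
  induction l with
  | nil => simp [pvSplit0]
  | cons a t ih =>
    have ha := hg a (by simp)
    have ih' := ih (fun a h => hg a (List.mem_cons_of_mem _ h))
    simp only [List.map_cons, pvSplit0]
    by_cases h : a = z
    · rw [if_pos (ha.mpr h), if_pos h, ih']; simp
    · rw [if_neg (fun hw => h (ha.mp hw)), if_neg h, ih']
      cases hs : pvSplit0 z t with
      | nil => exact absurd hs (pvSplit0_ne_nil z t)
      | cons p ps => simp

theorem pvAppLast_append {α : Type} (a : α) (ls : List (List α)) (q : List α) :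
    pvAppLast a (ls ++ [q]) = ls ++ [q ++ [a]] := by
  induction ls with
  | nil => rfl
  | cons p ps ih =>
    cases ps with
    | nil => rfl
    | cons p' ps' =>
      simp only [List.cons_append] at ih ⊢
      simp only [pvAppLast]
      rw [ih]

theorem pvSplit0_append {α : Type} [DecidableEq α] (z : α) (m : List α) (a : α) :
    pvSplit0 z (m ++ [a])
      = if a = z then pvSplit0 z m ++ [[]] else pvAppLast a (pvSplit0 z m) := by
  induction m with
  | nil => by_cases h : a = z <;> simp [pvSplit0, h, pvAppLast]
  | cons b m' ih =>
    simp only [List.cons_append, pvSplit0]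
    by_cases hb : b = z
    · rw [if_pos hb, if_pos hb, ih]
      by_cases h : a = z
      · simp [h]
      · rw [if_neg h, if_neg h]
        cases hs : pvSplit0 z m' with
        | nil => exact absurd hs (pvSplit0_ne_nil z m')
        | cons p ps => cases ps <;> simp [pvAppLast]
    · rw [if_neg hb, if_neg hb, ih]
      by_cases h : a = z
      · rw [if_pos h, if_pos h]
        cases hs : pvSplit0 z m' with
        | nil => exact absurd hs (pvSplit0_ne_nil z m')
        | cons p ps => simp
      · rw [if_neg h, if_neg h]
        cases hs : pvSplit0 z m' with
        | nil => exact absurd hs (pvSplit0_ne_nil z m')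
        | cons p ps =>
          cases ps with
          | nil => simp [pvAppLast]
          | cons p' ps' => simp [pvAppLast]

theorem pvSplit0_reverse {α : Type} [DecidableEq α] (z : α) (l : List α) :
    pvSplit0 z l.reverse = ((pvSplit0 z l).map List.reverse).reverse := by
  induction l with
  | nil => simp [pvSplit0]
  | cons a t ih =>
    rw [List.reverse_cons, pvSplit0_append, ih]
    simp only [pvSplit0]
    by_cases h : a = z
    · simp [h]
    · rw [if_neg h, if_neg h]
      cases hs : pvSplit0 z t with
      | nil => exact absurd hs (pvSplit0_ne_nil z t)
      | cons p ps =>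
        simp only [List.map_cons, List.reverse_cons]
        rw [pvAppLast_append]

theorem pvSplit0_mem {α : Type} [DecidableEq α] (z : α) (l : List α) :
    ∀ p ∈ pvSplit0 z l, ∀ x ∈ p, x ∈ l ∧ x ≠ z := by
  induction l with
  | nil => intro p hp x hx; simp [pvSplit0] at hp; subst hp; simp at hx
  | cons a t ih =>
    intro p hp x hx
    simp only [pvSplit0] at hp
    split_ifs at hp with h
    · rcases List.mem_cons.mp hp with rfl | hm
      · simp at hx
      · have := ih p hm x hx; exact ⟨List.mem_cons_of_mem _ this.1, this.2⟩
    · cases hs : pvSplit0 z t with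
      | nil => exact absurd hs (pvSplit0_ne_nil z t)
      | cons q qs =>
        rw [hs] at hp
        rcases List.mem_cons.mp hp with rfl | hm
        · rcases List.mem_cons.mp hx with rfl | hx'
          · exact ⟨by simp, h⟩
          · have := ih q (by rw [hs]; simp) x hx'
            exact ⟨List.mem_cons_of_mem _ this.1, this.2⟩
        · have := ih p (by rw [hs]; simp [hm]) x hx
          exact ⟨List.mem_cons_of_mem _ this.1, this.2⟩

theorem pvChr_toNat (d : Int) (h0 : 0 ≤ d) (h9 : d ≤ 9) :
    (pvChr d).toNat = 48 + d.toNat := by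
  interval_cases d <;> decide

theorem pvChr_eq_zero_iff (d : Int) (h0 : 0 ≤ d) (h9 : d ≤ 9) :
    pvChr d = '0' ↔ d = 0 := by
  interval_cases d <;> decide

theorem pvVal_cons (d : Int) (p : List Int) : pvVal (d :: p) = 10 * pvVal p + d := by
  simp [pvVal]

theorem pvVal_nonneg (p : List Int) (h : ∀ x ∈ p, 0 ≤ x) : 0 ≤ pvVal p := by
  induction p with
  | nil => simp [pvVal]
  | cons d t ih =>
    rw [pvVal_cons]
    have := h d (by simp)
    have := ih (fun x hx => h x (List.mem_cons_of_mem _ hx))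
    omega

theorem pvVal_pos (p : List Int) (hne : p ≠ []) (h : ∀ x ∈ p, 0 ≤ x ∧ x ≠ 0) :
    1 ≤ pvVal p := by
  cases p with
  | nil => exact absurd rfl hne
  | cons d t =>
    rw [pvVal_cons]
    have hd := h d (by simp)
    have := pvVal_nonneg t (fun x hx => (h x (List.mem_cons_of_mem _ hx)).1)
    omega

theorem pvParse_fold (q : List Int) (h : ∀ d ∈ q, 0 ≤ d ∧ d ≤ 9) : ∀ a : Int,
    (q.map pvChr).foldl (fun a c => 10 * a + ((c.toNat : Int) - 48)) a
      = q.foldl (fun a d => 10 * a + d) a := by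
  induction q with
  | nil => intro a; simp
  | cons d t ih =>
    intro a
    simp only [List.map_cons, List.foldl_cons]
    have hd := h d (by simp)
    have h48 := pvChr_toNat d hd.1 hd.2
    have heq : ((pvChr d).toNat : Int) - 48 = d := by rw [h48]; push_cast; omega
    rw [heq]
    exact ih (fun x hx => h x (List.mem_cons_of_mem _ hx)) _

theorem pvParseDigits_eq_val (q : List Int) (h : ∀ d ∈ q, 0 ≤ d ∧ d ≤ 9) :
    pvParseDigits (q.map pvChr) = pvVal q.reverse := by
  rw [pvVal, List.foldr_reverse, pvParseDigits, pvParse_fold q h 0]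

theorem pvBLoop_spec (t : List Int) : ∀ (cur mult : Int) (cands : List Int),
    (∀ d ∈ t, 0 ≤ d) → 0 ≤ cur → 1 ≤ mult →
    pvFin (pvBLoop t cur mult cands) = cands ++ pvSegs cur mult (pvSplit0 0 t) := by
  induction t with
  | nil =>
    intro cur mult cands _ _ _
    simp only [pvBLoop, pvFin_def, pvSplit0, pvSegs, pvVal]
    by_cases h : cur ≠ 0 <;> simp [h]
  | cons d t ih =>
    intro cur mult cands hb hcur hmult
    have hd := hb d (by simp)
    have hb' : ∀ x ∈ t, 0 ≤ x := fun x hx => hb x (List.mem_cons_of_mem _ hx)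
    have hmemt := pvSplit0_mem 0 t
    simp only [pvBLoop, pvSplit0]
    by_cases hdz : d ≠ 0
    · rw [if_pos hdz, if_neg hdz, ih _ _ _ hb' (by nlinarith) (by omega)]
      cases hs : pvSplit0 0 t with
      | nil => exact absurd hs (pvSplit0_ne_nil 0 t)
      | cons p ps =>
        have hval : cur + mult * pvVal (d :: p) = cur + d * mult + mult * 10 * pvVal p := by
          rw [pvVal_cons]; ring
        simp only [pvSegs, hval]
    · rw [if_neg hdz, if_pos (by omega : d = 0), ih _ _ _ hb' (by omega) (by omega)]
      cases hs : pvSplit0 0 t with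
      | nil => exact absurd hs (pvSplit0_ne_nil 0 t)
      | cons p ps =>
        have hp1 : p ≠ [] → 1 ≤ pvVal p := fun hpe =>
          pvVal_pos p hpe (fun x hx =>
            have hm := hmemt p (by rw [hs]; simp) x hx
            ⟨hb' x hm.1, hm.2⟩)
        have hps : (0 : Int) + 1 * pvVal p = pvVal p := by ring
        simp only [pvSegs, List.filter_cons, hps]
        have h0 : cur + mult * pvVal ([] : List Int) = cur := by simp [pvVal]
        rw [h0]
        by_cases hpe : p = []
        · subst hpe
          have hz : pvVal ([] : List Int) = 0 := by simp [pvVal]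
          rw [hz]
          by_cases hc : cur ≠ 0 <;> simp [hc]
        · have hv : pvVal p ≠ 0 := by have := hp1 hpe; omega
          rw [if_pos hv, if_pos (show decide (p ≠ []) = true by simpa using hpe)]
          by_cases hc : cur ≠ 0 <;> simp [hc]

theorem pvPrime_eq (c : Int) (h : 1 ≤ c) : pvIsPrimeA c = pvIsPrimeB c := by
  unfold pvIsPrimeA pvIsPrimeB
  by_cases h1 : c = 1
  · subst h1; simp
  · have h2 : 2 ≤ c := by omega
    have hcond : (c == 0 || c == 1) = false := by simp; omega
    rw [hcond]
    simp
    omega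

theorem pvSegs_init (ds : List Int) (hb : ∀ d ∈ ds, 0 ≤ d) :
    pvSegs 0 1 (pvSplit0 0 ds) = ((pvSplit0 0 ds).filter (· ≠ [])).map pvVal := by
  cases hs : pvSplit0 0 ds with
  | nil => exact absurd hs (pvSplit0_ne_nil 0 ds)
  | cons p ps =>
    have hp1 : p ≠ [] → 1 ≤ pvVal p := fun hpe =>
      pvVal_pos p hpe (fun x hx =>
        have hm := pvSplit0_mem 0 ds p (by rw [hs]; simp) x hx
        ⟨hb x hm.1, hm.2⟩)
    have hps : (0 : Int) + 1 * pvVal p = pvVal p := by ring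
    simp only [pvSegs, List.filter_cons, hps]
    by_cases hpe : p = []
    · subst hpe
      have hz : pvVal ([] : List Int) = 0 := by simp [pvVal]
      simp [hz]
    · have hv : pvVal p ≠ 0 := by have := hp1 hpe; omega
      rw [if_pos hv]
      simp [hpe]

-- the common digit-level form of both programs' answers
theorem pvMain (n k : Int)
    (hb : ∀ d ∈ pvDigits (n.toNat + 1) n k, 0 ≤ d ∧ d ≤ 9) :
    solution n k = solution_alt n k := by
  have hnn : ∀ d ∈ pvDigits (n.toNat + 1) n k, 0 ≤ d := fun d hd => (hb d hd).1
  -- A side at digit level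
  have hchanged : pvConvert n k = ((pvDigits (n.toNat + 1) n k).reverse).map pvChr := by
    rw [pvConvert, pvConvertLoop_eq_digits, List.nil_append, List.map_reverse]
  have hbefore : (PySem.Chars.split? (pvConvert n k) ['0']).getD []
      = (pvSplit0 0 (pvDigits (n.toNat + 1) n k).reverse).map (List.map pvChr) := by
    rw [PySem.Chars.split?]
    simp only [List.isEmpty_cons, Option.getD_some, if_neg (by decide : ¬ (false = true))]
    rw [hchanged, pvSplitOn_eq, pvSplit0_map (0 : Int) '0' pvChr]
    intro a ha
    have := hb a (List.mem_reverse.mp ha)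
    exact pvChr_eq_zero_iff a this.1 this.2
  have hbrev : ∀ q ∈ pvSplit0 0 (pvDigits (n.toNat + 1) n k).reverse,
      ∀ x ∈ q, 0 ≤ x ∧ x ≤ 9 := by
    intro q hq x hx
    have := pvSplit0_mem 0 _ q hq x hx
    exact hb x (List.mem_reverse.mp this.1)
  have hcand : ((pvSplit0 0 (pvDigits (n.toNat + 1) n k).reverse).map (List.map pvChr)).foldl
        (fun acc c => if c ≠ [] then acc ++ [pvParseDigits c] else acc) ([] : List Int)
      = (((pvSplit0 0 (pvDigits (n.toNat + 1) n k)).filter (· ≠ [])).map pvVal).reverse := by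
    have hfold := PySem.List.foldl_append_if (fun c : List Char => decide (c ≠ []))
      pvParseDigits ((pvSplit0 0 (pvDigits (n.toNat + 1) n k).reverse).map (List.map pvChr)) []
    simp only [decide_eq_true_eq] at hfold
    rw [hfold, List.nil_append, List.filter_map, List.map_map]
    have hfc : ((pvSplit0 0 (pvDigits (n.toNat + 1) n k).reverse).filter
          ((fun c : List Char => decide (c ≠ [])) ∘ List.map pvChr))
        = (pvSplit0 0 (pvDigits (n.toNat + 1) n k).reverse).filter (· ≠ []) := by
      apply List.filter_congr
      intro q _
      simp
    rw [hfc]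
    have hpm : ∀ q ∈ (pvSplit0 0 (pvDigits (n.toNat + 1) n k).reverse).filter (· ≠ []),
        (pvParseDigits ∘ List.map pvChr) q = pvVal q.reverse := by
      intro q hq
      exact pvParseDigits_eq_val q (hbrev q (List.mem_of_mem_filter hq))
    rw [List.map_congr_left hpm]
    -- transport the reversal
    rw [pvSplit0_reverse, List.filter_reverse, List.filter_map, List.map_reverse, List.map_map]
    congr 1
    have hfc2 : ((pvSplit0 0 (pvDigits (n.toNat + 1) n k)).filter
          ((fun q : List Int => decide (q ≠ [])) ∘ List.reverse))
        = (pvSplit0 0 (pvDigits (n.toNat + 1) n k)).filter (· ≠ []) := by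
      apply List.filter_congr
      intro q _
      simp
    rw [hfc2]
    apply List.map_congr_left
    intro q _
    simp
  -- both answers as a prime count over the same candidate list
  have hA : solution n k
      = ((List.countP pvIsPrimeA
          (((pvSplit0 0 (pvDigits (n.toNat + 1) n k)).filter (· ≠ [])).map pvVal) : Nat) : Int) := by
    simp only [solution]
    rw [hbefore, hcand]
    by_cases hL0 : ((pvSplit0 0 (pvDigits (n.toNat + 1) n k)).filter (· ≠ [])).map pvVal = []
    · rw [hL0]; simp
    · rw [if_neg (by simpa [List.length_eq_zero_iff] using hL0)]
      rw [PySem.List.foldl_count_if]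
      simp [List.countP_reverse]
  have hB : solution_alt n k
      = ((List.countP pvIsPrimeB
          (((pvSplit0 0 (pvDigits (n.toNat + 1) n k)).filter (· ≠ [])).map pvVal) : Nat) : Int) := by
    simp only [solution_alt]
    rw [pvAltLoop_eq_bLoop, ← pvFin_def,
        pvBLoop_spec _ 0 1 [] hnn le_rfl le_rfl, List.nil_append, pvSegs_init _ hnn]
    rw [PySem.List.foldl_count_if]
    simp
  rw [hA, hB]
  congr 1
  apply List.countP_congr
  intro c hc
  obtain ⟨q, hq, rfl⟩ := List.mem_map.mp hc
  have hqne : q ≠ [] := by simpa using List.of_mem_filter hq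
  have h1 : 1 ≤ pvVal q := pvVal_pos q hqne (fun x hx =>
    have hm := pvSplit0_mem 0 _ q (List.mem_of_mem_filter hq) x hx
    ⟨(hb x hm.1).1, hm.2⟩)
  rw [pvPrime_eq _ h1]

-- ===== VERDICT (by name: the statement is the Claim_ definition above) =====
theorem solution_spec : Claim_equal_solution := by
  intro n k _ hpre
  unfold Spec_solution
  apply pvMain
  rcases hpre with h | ⟨h2, h10⟩
  · rw [pvDigits_nil_of_nonpos _ _ _ h]; intro d hd; simp at hd
  · exact pvDigits_bounds _ _ _ h2 h10
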